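-- pv_equiv track=rewrite | github.com/SocioProphet/Heller-Godel | tests/test_admissible_statistics_motzkin.py | predicted_coeffs_from_bivariate_gf
-- ===== SOURCE A (Python) =====
-- def predicted_coeffs_from_bivariate_gf(
--     profiles: list[dict[tuple[int, int], int]],
--     c: int,
--     a: int,
--     b: int,
-- ) -> dict[int, int]:
--     """Coefficient support of x^c F(x^a, x^b).
--
--     F(y,z) = sum count(U,B) y^U z^B.
--     """
--     coeffs: dict[int, int] = {}
--     for level_profiles in profiles:
--         for (u, binary), count in level_profiles.items():
--             exponent = c + a * u + b * binary
--             coeffs[exponent] = coeffs.get(exponent, 0) + count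
--     return dict(sorted(coeffs.items()))
-- ===== SOURCE B (Python) =====
-- def predicted_coeffs_from_bivariate_gf(
--     profiles: list[dict[tuple[int, int], int]],
--     c: int,
--     a: int,
--     b: int,
-- ) -> dict[int, int]:
--     """Coefficient support of x^c F(x^a, x^b): sort-then-group instead of hash-aggregate."""
--     pairs = sorted(
--         (
--             (c + a * u + b * binary, count)
--             for level_profiles in profiles
--             for (u, binary), count in level_profiles.items()
--         ),
--         key=lambda p: p[0],
--     )
--     coeffs: dict[int, int] = {}
--     if pairs:
--         exponent, total = pairs[0]
--         for e, n in pairs[1:]: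
--             if e == exponent:
--                 total += n
--             else:
--                 coeffs[exponent] = total
--                 exponent, total = e, n
--         coeffs[exponent] = total
--     return coeffs
-- ===== Notes on version B (the rewrite author's own statement) =====
-- stated objective: alternative
-- what changed: Replaces A's hash-aggregate-then-sort (dict accumulation keyed by exponent, then sorting the items) by sort-then-group: flatten all (exponent, count) pairs, sort them by exponent once, and sum each consecutive run of equal exponents, building the result directly in ascending key order with no intermediate accumulation dict.
import Mathlib
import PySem

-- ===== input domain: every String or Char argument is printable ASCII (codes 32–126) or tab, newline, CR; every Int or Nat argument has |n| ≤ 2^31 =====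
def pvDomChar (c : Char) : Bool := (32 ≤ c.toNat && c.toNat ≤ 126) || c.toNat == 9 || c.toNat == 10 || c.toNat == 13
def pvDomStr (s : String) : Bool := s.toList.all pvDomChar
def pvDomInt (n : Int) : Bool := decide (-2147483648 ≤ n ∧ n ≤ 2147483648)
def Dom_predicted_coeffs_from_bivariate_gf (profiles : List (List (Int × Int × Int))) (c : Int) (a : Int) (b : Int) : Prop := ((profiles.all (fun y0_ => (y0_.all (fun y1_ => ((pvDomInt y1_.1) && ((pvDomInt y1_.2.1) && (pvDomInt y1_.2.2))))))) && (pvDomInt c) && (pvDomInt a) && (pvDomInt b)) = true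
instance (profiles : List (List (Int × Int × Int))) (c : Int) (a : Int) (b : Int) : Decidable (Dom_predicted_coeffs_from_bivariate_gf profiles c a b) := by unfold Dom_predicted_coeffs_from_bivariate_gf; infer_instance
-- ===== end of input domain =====

-- B replaces A's hash-aggregate-then-sort by sort-then-group over the flattened (exponent, count) pairs (alternative decomposition; return value only).


-- ===== PORT A =====
-- dict accumulation keyed by exponent, then dict(sorted(coeffs.items())).
-- The dict's keys are distinct, so Python's lexicographic tuple sort of the items
-- never compares second components: (stable) sorting by the key is exact here.
def predicted_coeffs_from_bivariate_gf (profiles : List (List (Int × Int × Int))) (c : Int) (a : Int) (b : Int) : List (Int × Int) :=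
  let coeffs : PySem.Dict Int Int :=
    profiles.foldl (fun d level_profiles =>
      level_profiles.foldl (fun d t =>
        let exponent := c + a * t.1 + b * t.2.1
        d.insert exponent (d.getD exponent 0 + t.2.2)) d) PySem.Dict.empty
  PySem.List.sorted coeffs.items (fun p => p.1) false

-- ===== PORT B =====
-- the scan over pairs[1:] carrying (exponent, total); emits a group when the key changes
def pvGroupScan (exponent : Int) (total : Int) : List (Int × Int) → List (Int × Int)
  | [] => [(exponent, total)]
  | q :: rest =>
    if q.1 == exponent then pvGroupScan exponent (total + q.2) rest
    else (exponent, total) :: pvGroupScan q.1 q.2 rest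

def predicted_coeffs_from_bivariate_gf_alt (profiles : List (List (Int × Int × Int))) (c : Int) (a : Int) (b : Int) : List (Int × Int) :=
  let pairs := PySem.List.sorted
    (profiles.flatMap (fun level_profiles =>
      level_profiles.map (fun t => (c + a * t.1 + b * t.2.1, t.2.2))))
    (fun p => p.1) false
  match pairs with
  | [] => []
  | p :: rest => pvGroupScan p.1 p.2 rest

-- ===== PRECONDITION & SPEC =====
def Spec_predicted_coeffs_from_bivariate_gf (profiles : List (List (Int × Int × Int))) (c : Int) (a : Int) (b : Int) (out : List (Int × Int)) : Prop := out = predicted_coeffs_from_bivariate_gf_alt profiles c a b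
instance (profiles : List (List (Int × Int × Int))) (c : Int) (a : Int) (b : Int) (out : List (Int × Int)) : Decidable (Spec_predicted_coeffs_from_bivariate_gf profiles c a b out) := by unfold Spec_predicted_coeffs_from_bivariate_gf; infer_instance

-- ===== CLAIM (what is proved, stated in full; the proofs are below) =====
def Claim_equal_predicted_coeffs_from_bivariate_gf : Prop := ∀ (profiles : List (List (Int × Int × Int))) (c : Int) (a : Int) (b : Int), Dom_predicted_coeffs_from_bivariate_gf profiles c a b → Spec_predicted_coeffs_from_bivariate_gf profiles c a b (predicted_coeffs_from_bivariate_gf profiles c a b)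

-- ===== LEMMAS AND PROOFS =====

-- total count attached to exponent k in the pair list l
def pvS (l : List (Int × Int)) (k : Int) : Int := ((l.filter (fun p => p.1 == k)).map (·.2)).sum

lemma pvS_cons (p : Int × Int) (t : List (Int × Int)) (k : Int) :
    pvS (p :: t) k = (if p.1 = k then p.2 else 0) + pvS t k := by
  simp only [pvS, List.filter_cons]
  by_cases h : p.1 = k <;> simp [h]

lemma pvS_eq_zero (l : List (Int × Int)) (k : Int) (h : ∀ p ∈ l, p.1 ≠ k) : pvS l k = 0 := by
  induction l with
  | nil => rfl
  | cons p t ih =>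
    rw [pvS_cons, ih (fun q hq => h q (List.mem_cons_of_mem _ hq))]
    simp [h p (List.mem_cons_self)]

lemma pvS_of_perm (l l' : List (Int × Int)) (h : l.Perm l') (k : Int) : pvS l k = pvS l' k :=
  List.Perm.sum_eq (List.Perm.map _ (List.Perm.filter _ h))

-- the accumulation step of port A, on an already-built (exponent, count) pair
def pvStep (d : PySem.Dict Int Int) (p : Int × Int) : PySem.Dict Int Int :=
  d.insert p.1 (d.getD p.1 0 + p.2)

lemma pvFoldFlatten (profiles : List (List (Int × Int × Int))) (c a b : Int) (d : PySem.Dict Int Int) :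
    profiles.foldl (fun d level_profiles =>
      level_profiles.foldl (fun d t =>
        let exponent := c + a * t.1 + b * t.2.1
        d.insert exponent (d.getD exponent 0 + t.2.2)) d) d
    = (profiles.flatMap (fun level_profiles =>
        level_profiles.map (fun t => (c + a * t.1 + b * t.2.1, t.2.2)))).foldl pvStep d := by
  induction profiles generalizing d with
  | nil => rfl
  | cons lp rest ih =>
    simp only [List.foldl_cons, List.flatMap_cons, List.foldl_append, ih, List.foldl_map, pvStep]

lemma pvGetD_fold (l : List (Int × Int)) (d : PySem.Dict Int Int) (k : Int) :
    (l.foldl pvStep d).getD k 0 = d.getD k 0 + pvS l k := by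
  induction l generalizing d with
  | nil => simp [pvS]
  | cons p t ih =>
    simp only [List.foldl_cons, ih, pvS, List.filter_cons, pvStep, PySem.Dict.getD_insert]
    by_cases h : k = p.1
    · simp [h]; ring
    · simp [h, Ne.symm h]

lemma pvKeys_fold (l : List (Int × Int)) :
    (l.foldl pvStep PySem.Dict.empty).keys = PySem.Set.ofList (l.map (·.1)) := by
  have h := PySem.Dict.keys_foldl_insert_key (l := l) (key := fun p => p.1)
    (f := fun d p => d.getD p.1 0 + p.2) (d := PySem.Dict.empty)
  simpa [pvStep, PySem.Dict.keys_empty, PySem.Set.update_nil_left] using h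

lemma pvNodupKeys_fold (l : List (Int × Int)) :
    (l.foldl pvStep PySem.Dict.empty).keys.Nodup := by
  have h := PySem.Dict.nodup_keys_foldl_insert_key (l := l) (key := fun p => p.1)
    (f := fun d p => d.getD p.1 0 + p.2) (d := PySem.Dict.empty) PySem.Dict.nodup_keys_empty
  simpa [pvStep] using h

lemma pvItems_fold (l : List (Int × Int)) :
    (l.foldl pvStep PySem.Dict.empty).items
      = (PySem.Set.ofList (l.map (·.1))).map (fun k => (k, pvS l k)) := by
  rw [PySem.Dict.items_eq_map_keys _ (pvNodupKeys_fold l) 0, pvKeys_fold l]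
  apply List.map_congr_left
  intro k _
  rw [pvGetD_fold, PySem.Dict.getD_empty]
  simp

lemma pvDedup_cons_self (x : Int) (t : List Int) :
    PySem.List.dedup (x :: x :: t) = PySem.List.dedup (x :: t) := by
  simp only [PySem.List.dedup_eq_ofList, PySem.Set.ofList_cons]
  simp [PySem.Set.discard]

lemma pvDedup_cons_not_mem (x : Int) (t : List Int) (h : x ∉ t) :
    PySem.List.dedup (x :: t) = x :: PySem.List.dedup t := by
  simp only [PySem.List.dedup_eq_ofList, PySem.Set.ofList_cons]
  congr 1
  simp only [PySem.Set.discard]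
  rw [List.filter_eq_self]
  intro y hy
  have h2 : y ∈ t := (PySem.Set.mem_ofList (y := y) (xs := t)).mp hy
  simp; rintro rfl; exact h h2

lemma pvDedup_sublist (t : List Int) : (PySem.List.dedup t).Sublist t := by
  induction t with
  | nil => simp
  | cons x r ih =>
    simp only [PySem.List.dedup_eq_ofList, PySem.Set.ofList_cons] at *
    exact List.Sublist.cons₂ x
      (List.Sublist.trans (List.filter_sublist (l := PySem.Set.ofList r)) ih)

-- characterization of the group scan on a key-sorted pair list
lemma pvGroupScan_char (l : List (Int × Int)) (e n : Int)
    (h : (((e, n) :: l).map (·.1)).Pairwise (· ≤ ·)) :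
    pvGroupScan e n l
      = (PySem.List.dedup (((e, n) :: l).map (·.1))).map (fun k => (k, pvS ((e, n) :: l) k)) := by
  induction l generalizing e n with
  | nil =>
    simp [pvGroupScan, PySem.List.dedup_eq_ofList, PySem.Set.ofList_cons, pvS, PySem.Set.discard]
  | cons q t ih =>
    simp only [List.map_cons] at h
    by_cases hq : q.1 = e
    · -- absorb q into the running total
      rw [show pvGroupScan e n (q :: t) = pvGroupScan e (n + q.2) t by
        simp [pvGroupScan, hq]]
      have h' : (((e, n + q.2) :: t).map (·.1)).Pairwise (· ≤ ·) := by
        simp only [List.map_cons]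
        exact List.pairwise_cons.mpr ⟨fun m hm => (List.pairwise_cons.mp h).1 m
          (List.mem_cons_of_mem _ hm), ((List.pairwise_cons.mp h).2).sublist
            ((t.map (·.1)).sublist_cons_self q.1)⟩
      rw [ih e (n + q.2) h']
      simp only [List.map_cons]
      rw [show (e : Int) :: q.1 :: t.map (·.1) = e :: e :: t.map (·.1) by rw [hq],
        pvDedup_cons_self]
      apply List.map_congr_left
      intro k _
      have hS : pvS ((e, n) :: q :: t) k = pvS ((e, n + q.2) :: t) k := by
        rw [pvS_cons, pvS_cons, pvS_cons, hq]
        by_cases hk : e = k <;> simp [hk] <;> ring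
      rw [hS]
    · -- key change: emit (e, n), recurse from q
      rw [show pvGroupScan e n (q :: t) = (e, n) :: pvGroupScan q.1 q.2 t by
        simp [pvGroupScan, hq]]
      have hpc := List.pairwise_cons.mp h
      have hq' : ((q :: t).map (·.1)).Pairwise (· ≤ ·) := by simpa using hpc.2
      have hlt : ∀ m ∈ (q :: t).map (·.1), e < m := by
        intro m hm
        rcases List.mem_cons.mp hm with rfl | hm'
        · exact lt_of_le_of_ne (hpc.1 _ List.mem_cons_self) (fun hh => hq hh.symm)
        · have h1 : q.1 ≤ m := (List.pairwise_cons.mp (by simpa using hpc.2)).1 m hm'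
          have h2 : e ≤ q.1 := hpc.1 _ List.mem_cons_self
          have h3 : e ≠ q.1 := fun hh => hq hh.symm
          omega
      have hnm : e ∉ (q :: t).map (·.1) := fun hm => lt_irrefl e (hlt e hm)
      rw [ih q.1 q.2 (by simpa using hq')]
      simp only [List.map_cons] at hnm ⊢
      rw [pvDedup_cons_not_mem e _ hnm]
      simp only [List.map_cons]
      congr 1
      · -- head of the emitted list
        have hh : pvS ((e, n) :: q :: t) e = n := by
          rw [pvS_cons]
          have hz := pvS_eq_zero (q :: t) e (by
            intro p hp hpe
            exact hnm (by simpa [hpe] using List.mem_map_of_mem (f := (·.1)) hp))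
          simp [hz]
        simp [hh]
      · apply List.map_congr_left
        intro k hk
        have hke : k ≠ e := by
          have hmem : k ∈ q.1 :: t.map (·.1) := (pvDedup_sublist _).mem hk
          rintro rfl
          exact hnm (by simpa using hmem)
        rw [show pvS ((e, n) :: q :: t) k = (if (e : Int) = k then n else 0) + pvS (q :: t) k
          from pvS_cons _ _ _, pvS_cons]
        simp [Ne.symm hke]

-- ===== VERDICT (by name: the statement is the Claim_ definition above) =====
theorem predicted_coeffs_from_bivariate_gf_spec : Claim_equal_predicted_coeffs_from_bivariate_gf := by
  intro profiles c a b _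
  unfold Spec_predicted_coeffs_from_bivariate_gf
  unfold predicted_coeffs_from_bivariate_gf predicted_coeffs_from_bivariate_gf_alt
  simp only [pvFoldFlatten, pvItems_fold]
  set xs := profiles.flatMap (fun level_profiles =>
    level_profiles.map (fun t => (c + a * t.1 + b * t.2.1, t.2.2))) with hxs
  have hperm : (PySem.List.sorted xs (fun p => p.1) false).Perm xs :=
    PySem.List.sorted_perm xs (fun p => p.1) false
  cases hys : PySem.List.sorted xs (fun p => p.1) false with
  | nil =>
    have hxe : xs = [] := (hys ▸ hperm).nil_eq.symm
    simp [hxe]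
    rfl
  | cons p rest =>
    show _ = pvGroupScan p.1 p.2 rest
    have hysfull : ((p.1, p.2) :: rest) = PySem.List.sorted xs (fun p => p.1) false := by
      rw [hys]
    have hpw : ((((p.1, p.2) : Int × Int) :: rest).map (·.1)).Pairwise (· ≤ ·) := by
      rw [hysfull]
      exact PySem.List.sorted_map_key_pairwise xs (fun p => p.1)
    rw [pvGroupScan_char rest p.1 p.2 hpw]
    -- both sides are maps of k ↦ (k, pvS xs k) over the same distinct keys
    have hpermfull : (((p.1, p.2) : Int × Int) :: rest).Perm xs := by rw [hysfull]; exact hperm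
    have hSmatch : ∀ k, pvS (((p.1, p.2) : Int × Int) :: rest) k = pvS xs k :=
      fun k => pvS_of_perm _ _ hpermfull k
    simp only [hSmatch]
    set ks := (((p.1, p.2) : Int × Int) :: rest).map (·.1) with hks
    -- key lists: dedup ks vs ofList (xs.map fst)
    have hkeyperm : (PySem.List.dedup ks).Perm (PySem.Set.ofList (xs.map (·.1))) := by
      rw [List.perm_ext_iff_of_nodup (PySem.List.nodup_dedup ks)
        (PySem.Set.nodup_ofList (xs.map (·.1)))]
      intro k
      rw [PySem.List.mem_dedup, PySem.Set.mem_ofList]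
      exact (List.Perm.map (·.1) hpermfull).mem_iff
    have hkeypw : (PySem.List.dedup ks).Pairwise (· < ·) := by
      have h1 : (PySem.List.dedup ks).Pairwise (· ≤ ·) :=
        (hks ▸ hpw).sublist (pvDedup_sublist ks)
      have h2 : (PySem.List.dedup ks).Nodup := PySem.List.nodup_dedup ks
      exact (h1.and h2).imp (fun hab => lt_of_le_of_ne hab.1 hab.2)
    apply PySem.List.sorted_eq_of_perm_of_pairwise_lt
    · exact List.Perm.map _ hkeyperm
    · exact List.pairwise_map.mpr (by simpa using hkeypw)
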